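-- pv_equiv track=rewrite | github.com/kth5954/CodingTest | programmers/lv2_1.py | solution
-- ===== SOURCE A (Python) =====
-- def solution(n):
--     arr = []
--     k = 0
--     while len(arr) < n:
--         switch = 0
--         str_k = str(k)
--         for i in ['3','5','6','7','8','9','0']:
--             if i in str_k:
--                 switch = 1
--         if not switch:
--             arr.append(k)
--         k += 1
--     return arr.pop()
-- ===== SOURCE B (Python) =====
-- def solution(n):
--     res = 0
--     p = 1
--     while n > 0:
--         n, r = divmod(n - 1, 3)
--         res += (1, 2, 4)[r] * p
--         p *= 10
--     return res
-- ===== Notes on version B (the rewrite author's own statement) =====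
-- stated objective: faster
-- what changed: A enumerates every integer from zero upward, string-testing each one for forbidden digits until it has collected n valid numbers; B computes the n-th valid number directly by a bijective base-three conversion that maps each remainder to the corresponding allowed digit, with no enumeration and no strings.
-- crash fix: On any n not positive, A raises IndexError (pop from the empty list); B returns zero. — e.g. on solution(0): A raises IndexError, B returns 0
import Mathlib
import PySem

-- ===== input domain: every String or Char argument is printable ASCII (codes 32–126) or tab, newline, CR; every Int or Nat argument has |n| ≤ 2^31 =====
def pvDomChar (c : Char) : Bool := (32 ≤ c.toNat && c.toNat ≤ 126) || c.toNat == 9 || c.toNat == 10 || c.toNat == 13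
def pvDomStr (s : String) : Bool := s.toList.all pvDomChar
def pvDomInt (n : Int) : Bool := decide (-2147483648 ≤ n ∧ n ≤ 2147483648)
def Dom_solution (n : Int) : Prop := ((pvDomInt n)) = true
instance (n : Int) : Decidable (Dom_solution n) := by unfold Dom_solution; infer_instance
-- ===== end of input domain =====

-- B replaces A's enumerate-and-filter search (string-testing every integer for forbidden digits)
-- by a direct bijective base-3 conversion of n to digits {1,2,4}; measured faster (asymptotic).
-- A's while-loop is ported with an explicit fuel (10^n, proven sufficient) that only makes it total.


-- ===== PORT A =====
-- the inner for-loop over ['3','5','6','7','8','9','0'] setting `switch`, then `if not switch`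
def goodA (k : Int) : Bool :=
  let str_k := PySem.Int.toStr k
  let switch : Int :=
    (["3", "5", "6", "7", "8", "9", "0"] : List String).foldl
      (fun sw i => if PySem.Str.isIn i str_k then 1 else sw) 0
  switch == 0

-- the while-loop; fuel only makes it total (10^n iterations are proven sufficient below)
def loopA (n : Int) : List Int → Int → Nat → List Int
  | arr, _, 0 => arr
  | arr, k, fuel + 1 =>
    if PySem.List.len arr < n then
      loopA n (if goodA k then arr ++ [k] else arr) (k + 1) fuel
    else arr

def solution (n : Int) : Int :=
  match PySem.List.pop? (loopA n [] 0 (10 ^ n.toNat)) with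
  | some r => r.1
  | none => 0   -- unreachable under Pre_: Python raises IndexError (pop from empty list)

-- ===== PORT B =====
-- while n > 0: n, r = divmod(n - 1, 3); res += (1, 2, 4)[r] * p; p *= 10
def altGo (n p res : Int) : Int :=
  if h : 0 < n then
    altGo (PySem.Int.floordiv (n - 1) 3) (p * 10)
      (res + (PySem.List.pyGet? ([1, 2, 4] : List Int) (PySem.Int.mod (n - 1) 3)).getD 0 * p)
  else res
termination_by n.toNat
decreasing_by
  rw [PySem.Int.floordiv_eq_ediv_of_pos (by omega : (0:Int) < 3)]
  omega

def solution_alt (n : Int) : Int := altGo n 1 0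

-- ===== PRECONDITION & SPEC =====
-- Python A raises IndexError (pop from the empty list) when n <= 0; Pre_ excludes exactly that.
def Pre_solution (n : Int) : Prop := 1 ≤ n
instance (n : Int) : Decidable (Pre_solution n) := by unfold Pre_solution; infer_instance
def pvWitness_solution : Int := 3

-- On n <= 0 A raises IndexError (pop from the empty list); B returns 0.
def Raises_solution (n : Int) : Prop := n ≤ 0
instance (n : Int) : Decidable (Raises_solution n) := by unfold Raises_solution; infer_instance
def pvRaiseWitness_solution : Int := 0
def pvRaiseWitnessOut_solution : Int := 0

def Spec_solution (n : Int) (out : Int) : Prop := out = solution_alt n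
instance (n : Int) (out : Int) : Decidable (Spec_solution n out) := by unfold Spec_solution; infer_instance

-- ===== CLAIM (what is proved, stated in full; the proofs are below) =====
def Claim_equal_solution : Prop := ∀ (n : Int), Dom_solution n → Pre_solution n → Spec_solution n (solution n)
def Claim_raises_solution : Prop := (∀ (n : Int), Dom_solution n → Raises_solution n → ¬ Pre_solution n) ∧ (Dom_solution (pvRaiseWitness_solution) ∧ Raises_solution (pvRaiseWitness_solution) ∧ solution_alt (pvRaiseWitness_solution) = pvRaiseWitnessOut_solution)

-- ===== LEMMAS AND PROOFS =====

-- the digit map r ↦ (1,2,4)[r] and the n-th {1,2,4}-number, abstractly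
def c3 (r : ℕ) : ℕ := if r = 0 then 1 else if r = 1 then 2 else 4

def f124 : ℕ → ℕ
  | 0 => 0
  | m + 1 => 10 * f124 (m / 3) + c3 (m % 3)
decreasing_by exact Nat.lt_succ_of_le (Nat.div_le_self m 3)

def okDigits (v : ℕ) : Prop := ∀ d ∈ Nat.digits 10 v, d = 1 ∨ d = 2 ∨ d = 4

lemma c3_cases (r : ℕ) : c3 r = 1 ∨ c3 r = 2 ∨ c3 r = 4 := by
  unfold c3; split_ifs <;> simp

lemma c3_pos (r : ℕ) : 1 ≤ c3 r := by rcases c3_cases r with h | h | h <;> omega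
lemma c3_lt (r : ℕ) : c3 r < 10 := by rcases c3_cases r with h | h | h <;> omega

lemma f124_step (q r : ℕ) (hr : r < 3) : f124 (3 * q + r + 1) = 10 * f124 q + c3 r := by
  have h1 : (3 * q + r) / 3 = q := by omega
  have h2 : (3 * q + r) % 3 = r := by omega
  rw [show 3 * q + r + 1 = (3 * q + r) + 1 from rfl, f124, h1, h2]

lemma f124_lt_succ (m : ℕ) : f124 m < f124 (m + 1) := by
  induction m using Nat.strong_induction_on with
  | _ m ih =>
    rcases Nat.eq_zero_or_pos m with rfl | hm
    · show f124 0 < f124 1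
      rw [show (1:ℕ) = 3 * 0 + 0 + 1 from rfl, f124_step 0 0 (by omega)]
      simp [f124, c3]
    · obtain ⟨q, r, hr, rfl⟩ : ∃ q r, r < 3 ∧ m = 3 * q + r :=
        ⟨m / 3, m % 3, by omega, by omega⟩
      rw [f124_step q r hr]
      rcases Nat.eq_zero_or_pos r with rfl | hrpos
      · -- m = 3q, q ≥ 1 : compare f(3(q-1)+2+1) with 10 f q + c3 0
        have hq : 1 ≤ q := by omega
        have hm' : 3 * q = 3 * (q - 1) + 2 + 1 := by omega
        rw [hm', f124_step (q - 1) 2 (by omega)]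
        have hlt : f124 (q - 1) < f124 q := by
          have := ih (q - 1) (by omega)
          rwa [Nat.sub_add_cancel hq] at this
        have h2 : c3 2 = 4 := by simp [c3]
        have h0 : c3 0 = 1 := by simp [c3]
        omega
      · -- r ≥ 1 : f(3q + (r-1) + 1) = 10 f q + c3 (r-1)
        have hm' : 3 * q + r = 3 * q + (r - 1) + 1 := by omega
        rw [hm', f124_step q (r - 1) (by omega)]
        have : c3 (r - 1) < c3 r := by
          interval_cases r <;> simp [c3]
        omega

lemma f124_mono : StrictMono f124 := strictMono_nat_of_lt_succ f124_lt_succ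

lemma f124_pos (m : ℕ) (hm : 1 ≤ m) : 1 ≤ f124 m := by
  have := f124_mono (show 0 < m from hm)
  simpa [f124] using this

lemma digits_single (d : ℕ) (h1 : 1 ≤ d) (h2 : d < 10) : Nat.digits 10 d = [d] := by
  rw [Nat.digits_def' (by norm_num : 1 < 10) h1, Nat.mod_eq_of_lt h2,
    Nat.div_eq_of_lt h2]
  simp

lemma f124_ok (m : ℕ) (hm : 1 ≤ m) : okDigits (f124 m) := by
  induction m using Nat.strong_induction_on with
  | _ m ih =>
    obtain ⟨q, r, hr, rfl⟩ : ∃ q r, r < 3 ∧ m = 3 * q + r + 1 :=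
      ⟨(m - 1) / 3, (m - 1) % 3, by omega, by omega⟩
    rw [f124_step q r hr]
    rcases Nat.eq_zero_or_pos q with rfl | hq
    · simp only [f124, Nat.mul_zero, Nat.zero_add]
      intro d hd
      rw [digits_single (c3 r) (c3_pos r) (c3_lt r)] at hd
      simp at hd; subst hd; exact c3_cases r
    · have hfq : 1 ≤ f124 q := f124_pos q hq
      have hpos : 1 ≤ 10 * f124 q + c3 r := by have := c3_pos r; omega
      intro d hd
      rw [Nat.digits_def' (by norm_num : 1 < 10) hpos] at hd
      have hmod : (10 * f124 q + c3 r) % 10 = c3 r := by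
        have := c3_lt r; omega
      have hdiv : (10 * f124 q + c3 r) / 10 = f124 q := by
        have := c3_lt r; omega
      rw [hmod, hdiv] at hd
      rcases List.mem_cons.mp hd with rfl | hd'
      · exact c3_cases r
      · exact ih q (by omega) hq d hd'

lemma f124_surj (v : ℕ) (h1 : 1 ≤ v) (hok : okDigits v) :
    ∃ m, 1 ≤ m ∧ f124 m = v := by
  induction v using Nat.strong_induction_on with
  | _ v ih =>
    have hdig := Nat.digits_def' (by norm_num : 1 < 10) h1
    have hdmem : v % 10 = 1 ∨ v % 10 = 2 ∨ v % 10 = 4 := by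
      apply hok; rw [hdig]; exact List.mem_cons_self
    obtain ⟨r, hr, hcr⟩ : ∃ r, r < 3 ∧ c3 r = v % 10 := by
      rcases hdmem with h | h | h
      · exact ⟨0, by omega, by simp [c3, h]⟩
      · exact ⟨1, by omega, by simp [c3, h]⟩
      · exact ⟨2, by omega, by simp [c3, h]⟩
    rcases Nat.eq_zero_or_pos (v / 10) with hw | hw
    · refine ⟨r + 1, by omega, ?_⟩
      rw [show r + 1 = 3 * 0 + r + 1 by omega, f124_step 0 r hr]
      simp only [f124, Nat.mul_zero, Nat.zero_add]
      omega
    · have hokw : okDigits (v / 10) := by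
        intro d hd; apply hok; rw [hdig]; exact List.mem_cons_of_mem _ hd
      obtain ⟨m', hm', hfm'⟩ := ih (v / 10) (by omega) hw hokw
      refine ⟨3 * m' + r + 1, by omega, ?_⟩
      rw [f124_step m' r hr, hfm']
      omega

-- Nat.toDigits, characterised through Nat.digits
lemma toDigitsCore_eq (b : ℕ) (hb : 2 ≤ b) :
    ∀ (fu n : ℕ) (l : List Char), 1 ≤ fu → n < b ^ fu →
      Nat.toDigitsCore b fu n l =
        (if n = 0 then ['0'] else ((Nat.digits b n).map Nat.digitChar).reverse) ++ l := by
  intro fu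
  induction fu with
  | zero => intro n l h; omega
  | succ fu ih =>
    intro n l _ hlt
    rw [Nat.toDigitsCore]
    by_cases hdb : n / b = 0
    · have hnb : n < b := by
        rcases Nat.eq_zero_or_pos n with rfl | hn
        · omega
        · exact (Nat.div_eq_zero_iff_lt (by omega)).mp hdb
      rcases Nat.eq_zero_or_pos n with rfl | hn
      · simp [hdb, Nat.digitChar]
      · have hdg : Nat.digits b n = [n] := by
          rw [Nat.digits_def' (by omega : 1 < b) hn, Nat.mod_eq_of_lt hnb, hdb]
          simp
        rw [if_pos hdb, if_neg (by omega), hdg, Nat.mod_eq_of_lt hnb]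
        simp
    · have hn : 1 ≤ n := by
        rcases Nat.eq_zero_or_pos n with rfl | h
        · simp at hdb
        · exact h
      have hfu : 1 ≤ fu := by
        by_contra h
        have : fu = 0 := by omega
        subst this
        simp [pow_one] at hlt
        exact hdb (Nat.div_eq_zero_iff_lt (by omega) |>.mpr hlt)
      have hdiv : n / b < b ^ fu := by
        apply Nat.div_lt_of_lt_mul
        calc n < b ^ (fu + 1) := hlt
          _ = b * b ^ fu := by ring
      rw [if_neg hdb, ih (n / b) (Nat.digitChar (n % b) :: l) hfu hdiv, if_neg hdb,
        if_neg (by omega), Nat.digits_def' (by omega : 1 < b) hn]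
      simp

lemma toChars_nonneg (k : ℤ) (hk : 0 ≤ k) :
    PySem.Int.toChars k =
      if k.toNat = 0 then ['0'] else ((Nat.digits 10 k.toNat).map Nat.digitChar).reverse := by
  rw [PySem.Int.toChars, if_neg (by omega)]
  show Nat.toDigits 10 k.toNat = _
  have hlt : k.toNat < 10 ^ (k.toNat + 1) := by
    calc k.toNat < 2 ^ k.toNat := Nat.lt_two_pow_self
      _ ≤ 2 ^ (k.toNat + 1) := Nat.pow_le_pow_right (by norm_num) (by omega)
      _ ≤ 10 ^ (k.toNat + 1) := Nat.pow_le_pow_left (by norm_num) _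
  rw [Nat.toDigits, toDigitsCore_eq 10 (by norm_num) (k.toNat + 1) k.toNat [] (by omega) hlt]
  simp

lemma foldl_switch (p : String → Bool) (l : List String) (s : ℤ) :
    l.foldl (fun sw i => if p i then 1 else sw) s = if l.any p then 1 else s := by
  induction l generalizing s with
  | nil => simp
  | cons a t ih =>
    simp only [List.foldl_cons, List.any_cons, ih]
    by_cases ha : p a <;> by_cases ht : t.any p <;> simp [ha, ht]

lemma goodA_iff (k : ℤ) (hk : 0 ≤ k) :
    goodA k = true ↔ 1 ≤ k ∧ okDigits k.toNat := by
  show ((((["3", "5", "6", "7", "8", "9", "0"] : List String).foldl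
      (fun sw i => if PySem.Str.isIn i (PySem.Int.toStr k) then 1 else sw) (0 : ℤ)) == 0) = true)
      ↔ 1 ≤ k ∧ okDigits k.toNat
  rw [foldl_switch]
  have hmem : ∀ (c : Char) (i : String), i.toList = [c] →
      (PySem.Str.isIn i (PySem.Int.toStr k) = true ↔ c ∈ PySem.Int.toChars k) := by
    intro c i hi
    rw [PySem.Str.isIn_iff_infix, hi, PySem.Int.toList_toStr, List.singleton_infix_iff]
  constructor
  · intro hgood
    have hany : ((["3", "5", "6", "7", "8", "9", "0"] : List String).any
        fun i => PySem.Str.isIn i (PySem.Int.toStr k)) = false := by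
      by_contra hc
      rw [Bool.not_eq_false] at hc
      rw [if_pos hc] at hgood
      simp at hgood
    rw [List.any_eq_false] at hany
    have hno : ∀ (c : Char) (i : String), i ∈ (["3", "5", "6", "7", "8", "9", "0"] : List String) →
        i.toList = [c] → c ∉ PySem.Int.toChars k := by
      intro c i hi hic hcmem
      exact hany i hi ((hmem c i hic).mpr hcmem)
    rcases Nat.eq_zero_or_pos k.toNat with h0 | hpos
    · exfalso
      apply hno '0' "0" (by simp) rfl
      have hk0 : k = 0 := by omega
      rw [hk0, toChars_nonneg 0 le_rfl]
      simp
    · refine ⟨by omega, ?_⟩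
      have htc : PySem.Int.toChars k = ((Nat.digits 10 k.toNat).map Nat.digitChar).reverse := by
        rw [toChars_nonneg k hk, if_neg (by omega)]
      intro d hd
      have hdl : d < 10 := Nat.digits_lt_base (by norm_num) hd
      have hin : Nat.digitChar d ∈ PySem.Int.toChars k := by
        rw [htc]
        simp only [List.mem_reverse, List.mem_map]
        exact ⟨d, hd, rfl⟩
      by_contra hbad
      interval_cases d
      · exact hno '0' "0" (by simp) rfl hin
      · exact hbad (by omega)
      · exact hbad (by omega)
      · exact hno '3' "3" (by simp) rfl hin
      · exact hbad (by omega)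
      · exact hno '5' "5" (by simp) rfl hin
      · exact hno '6' "6" (by simp) rfl hin
      · exact hno '7' "7" (by simp) rfl hin
      · exact hno '8' "8" (by simp) rfl hin
      · exact hno '9' "9" (by simp) rfl hin
  · rintro ⟨hk1, hok⟩
    have htc : PySem.Int.toChars k = ((Nat.digits 10 k.toNat).map Nat.digitChar).reverse := by
      rw [toChars_nonneg k hk, if_neg (by omega)]
    have hnotin : ∀ (c : Char), (∀ d, d = 1 ∨ d = 2 ∨ d = 4 → Nat.digitChar d ≠ c) →
        c ∉ PySem.Int.toChars k := by
      intro c hc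
      rw [htc]
      simp only [List.mem_reverse, List.mem_map]
      rintro ⟨d, hd, rfl⟩
      exact hc d (hok d hd) rfl
    have hnone : ∀ i ∈ (["3", "5", "6", "7", "8", "9", "0"] : List String),
        PySem.Str.isIn i (PySem.Int.toStr k) = false := by
      intro i hi
      have key : ∀ (c : Char), i.toList = [c] → c ∉ PySem.Int.toChars k →
          PySem.Str.isIn i (PySem.Int.toStr k) = false := by
        intro c hic hcn
        rw [← Bool.not_eq_true, hmem c i hic]
        exact hcn
      fin_cases hi
      · exact key '3' rfl (hnotin '3' (by rintro d (rfl | rfl | rfl) <;> decide))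
      · exact key '5' rfl (hnotin '5' (by rintro d (rfl | rfl | rfl) <;> decide))
      · exact key '6' rfl (hnotin '6' (by rintro d (rfl | rfl | rfl) <;> decide))
      · exact key '7' rfl (hnotin '7' (by rintro d (rfl | rfl | rfl) <;> decide))
      · exact key '8' rfl (hnotin '8' (by rintro d (rfl | rfl | rfl) <;> decide))
      · exact key '9' rfl (hnotin '9' (by rintro d (rfl | rfl | rfl) <;> decide))
      · exact key '0' rfl (hnotin '0' (by rintro d (rfl | rfl | rfl) <;> decide))
    have hany : ((["3", "5", "6", "7", "8", "9", "0"] : List String).any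
        fun i => PySem.Str.isIn i (PySem.Int.toStr k)) = false := by
      rw [List.any_eq_false]
      intro i hi
      rw [hnone i hi]
      exact Bool.false_ne_true
    rw [if_neg (by rw [hany]; exact Bool.false_ne_true)]
    decide

-- the loop, characterised
def upto (m : ℕ) : List ℤ := (List.range m).map (fun i => (f124 (i + 1) : ℤ))

lemma upto_succ (m : ℕ) : upto (m + 1) = upto m ++ [(f124 (m + 1) : ℤ)] := by
  simp [upto, List.range_succ]

lemma len_upto (m : ℕ) : (upto m).length = m := by simp [upto]

lemma loop_done (n : ℤ) (arr : List ℤ) (k : ℤ) (fuel : ℕ)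
    (h : ¬ PySem.List.len arr < n) : loopA n arr k fuel = arr := by
  cases fuel with
  | zero => rw [loopA]
  | succ f => rw [loopA, if_neg h]

lemma loop_inv (n : ℤ) (N : ℕ) (hN : n = (N : ℤ)) (h1 : 1 ≤ N) :
    ∀ (fuel : ℕ) (m : ℕ) (k : ℤ), m < N → (f124 m : ℤ) < k → k ≤ (f124 (m + 1) : ℤ) →
      (f124 N : ℤ) + 2 ≤ (fuel : ℤ) + k → loopA n (upto m) k fuel = upto N := by
  intro fuel
  induction fuel with
  | zero =>
    intro m k hm hk1 hk2 hfuel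
    exfalso
    have : f124 (m + 1) ≤ f124 N := f124_mono.monotone (by omega)
    push_cast at hfuel
    omega
  | succ fuel ih =>
    intro m k hm hk1 hk2 hfuel
    have hkpos : 0 ≤ k := by
      have : (0 : ℤ) ≤ (f124 m : ℤ) := by positivity
      omega
    have hcond : PySem.List.len (upto m) < n := by
      simp [PySem.List.len_eq, len_upto, hN]; omega
    rw [loopA, if_pos hcond]
    by_cases hke : k = (f124 (m + 1) : ℤ)
    · have hgood : goodA k = true := by
        rw [goodA_iff k hkpos, hke]
        have hp := f124_pos (m + 1) (by omega)
        constructor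
        · exact_mod_cast hp
        · simpa using f124_ok (m + 1) (by omega)
      rw [if_pos hgood, hke, ← upto_succ]
      rcases Nat.lt_or_ge (m + 1) N with hlt | hge
      · apply ih (m + 1) ((f124 (m + 1) : ℤ) + 1) hlt (by omega)
        · have := f124_lt_succ (m + 1)
          omega
        · push_cast at hfuel ⊢; omega
      · have hNm : m + 1 = N := by omega
        rw [hNm]
        apply loop_done
        simp [PySem.List.len_eq, len_upto, hN]
    · have hbad : goodA k = false := by
        rw [← Bool.not_eq_true, goodA_iff k hkpos]
        rintro ⟨hk1', hok⟩
        obtain ⟨t, ht1, hft⟩ := f124_surj k.toNat (by omega) hok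
        have hftk : (f124 t : ℤ) = k := by omega
        have hmt : m < t := by
          have := f124_mono.lt_iff_lt (a := m) (b := t)
          rw [← this]; omega
        have htm : t < m + 1 := by
          have := f124_mono.lt_iff_lt (a := t) (b := m + 1)
          rw [← this]; omega
        omega
      rw [if_neg (by simp [hbad])]
      apply ih m (k + 1) hm (by omega) (by omega) (by push_cast at hfuel ⊢; omega)

lemma f124_bound (N : ℕ) (h1 : 1 ≤ N) : f124 N + 2 ≤ 10 ^ N := by
  induction N using Nat.strong_induction_on with
  | _ N ih =>
    obtain ⟨q, r, hr, rfl⟩ : ∃ q r, r < 3 ∧ N = 3 * q + r + 1 :=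
      ⟨(N - 1) / 3, (N - 1) % 3, by omega, by omega⟩
    rw [f124_step q r hr]
    have hcr := c3_lt r
    rcases Nat.eq_zero_or_pos q with rfl | hq
    · have h10 : (10 : ℕ) ≤ 10 ^ (3 * 0 + r + 1) := by
        calc (10 : ℕ) = 10 ^ 1 := by norm_num
          _ ≤ 10 ^ (3 * 0 + r + 1) := Nat.pow_le_pow_right (by norm_num) (by omega)
      have h4 : c3 r ≤ 4 := by rcases c3_cases r with h | h | h <;> omega
      have hf0 : f124 0 = 0 := by rw [f124]
      omega
    · have hih := ih q (by omega) hq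
      have hpow : (10 : ℕ) ^ (q + 1) ≤ 10 ^ (3 * q + r + 1) :=
        Nat.pow_le_pow_right (by norm_num) (by omega)
      have : 10 ^ (q + 1) = 10 * 10 ^ q := by ring
      omega

lemma goodA_zero : goodA 0 = false := by decide

lemma solution_eq (n : ℤ) (hn : 1 ≤ n) : solution n = (f124 n.toNat : ℤ) := by
  set N := n.toNat with hNdef
  have hN : n = (N : ℤ) := by omega
  have h1 : 1 ≤ N := by omega
  have hfuel : f124 N + 2 ≤ 10 ^ N := f124_bound N h1
  have hpow : 1 ≤ 10 ^ N := Nat.one_le_pow _ _ (by norm_num)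
  -- peel the first iteration (k = 0 is rejected: '0' is a forbidden digit)
  have hstep : loopA n [] 0 (10 ^ N) = loopA n [] 1 (10 ^ N - 1) := by
    obtain ⟨F, hF⟩ : ∃ F, 10 ^ N = F + 1 := ⟨10 ^ N - 1, by omega⟩
    rw [hF]
    rw [loopA, if_pos (by simp [PySem.List.len_eq, hN]; omega), goodA_zero]
    simp
  have hf1 : f124 1 = 1 := by
    rw [show (1 : ℕ) = 3 * 0 + 0 + 1 from rfl, f124_step 0 0 (by omega)]
    simp [f124, c3]
  have hloop : loopA n [] 1 (10 ^ N - 1) = upto N := by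
    have h0 : upto 0 = [] := by simp [upto]
    rw [← h0]
    apply loop_inv n N hN h1 (10 ^ N - 1) 0 1 h1
    · simp [f124]
    · rw [hf1]; norm_num
    · omega
  have hupto : upto N = upto (N - 1) ++ [(f124 N : ℤ)] := by
    conv_lhs => rw [show N = (N - 1) + 1 by omega]
    rw [upto_succ, show N - 1 + 1 = N by omega]
  unfold solution
  rw [hNdef] at hstep hloop ⊢
  rw [hstep, hloop, hupto, PySem.List.pop?_last]

lemma altGo_eq_aux : ∀ (M : ℕ) (n p res : ℤ), n.toNat = M →
    altGo n p res = res + p * (f124 M : ℤ) := by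
  intro M
  induction M using Nat.strong_induction_on with
  | _ M ih =>
    intro n p res hM
    by_cases h : 0 < n
    · rw [altGo, dif_pos h]
      obtain ⟨m, rfl⟩ : ∃ m, M = m + 1 := ⟨M - 1, by omega⟩
      have hq : PySem.Int.floordiv (n - 1) 3 = ((m / 3 : ℕ) : ℤ) := by
        rw [PySem.Int.floordiv_eq_ediv_of_pos (by omega : (0:ℤ) < 3)]
        omega
      have hrr : PySem.Int.mod (n - 1) 3 = ((m % 3 : ℕ) : ℤ) := by
        rw [PySem.Int.mod_eq_emod_of_pos (by omega : (0:ℤ) < 3)]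
        omega
      have hcv : (PySem.List.pyGet? ([1, 2, 4] : List ℤ) (PySem.Int.mod (n - 1) 3)).getD 0
          = (c3 (m % 3) : ℤ) := by
        rw [hrr]
        have h3 : m % 3 = 0 ∨ m % 3 = 1 ∨ m % 3 = 2 := by omega
        rcases h3 with h3 | h3 | h3 <;> rw [h3] <;> decide
      rw [hq, ih (m / 3) (by omega) _ _ _ (by omega), hcv, f124]
      push_cast
      ring
    · rw [altGo, dif_neg h]
      have h0 : M = 0 := by omega
      rw [h0, f124]
      ring

lemma altGo_eq (n p res : ℤ) : altGo n p res = res + p * (f124 n.toNat : ℤ) :=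
  altGo_eq_aux n.toNat n p res rfl

-- ===== VERDICT (by name: the statement is the Claim_ definition above) =====
theorem solution_spec : Claim_equal_solution := by
  intro n _ hpre
  unfold Spec_solution solution_alt
  rw [solution_eq n hpre, altGo_eq]
  ring

@[simp] theorem solution_raises : Claim_raises_solution := by
  unfold Claim_raises_solution
  refine ⟨?_, by decide, by decide, ?_⟩
  · intro n _ hr hp
    exact absurd hp (by unfold Pre_solution Raises_solution at *; omega)
  · unfold solution_alt pvRaiseWitness_solution pvRaiseWitnessOut_solution
    rw [altGo_eq]
    simp [f124]
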